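-- pv_equiv track=rewrite | github.com/gitububkm/ITMO | 5 Технологии и методы программирования/5/main.py | validate_grille
-- ===== SOURCE A (Python) =====
-- def rotate_coords(coords, n):
--     """Поворот координат на 90° по часовой, индексация 0..n-1."""
--     return [(c, n-1-r) for (r, c) in coords]
--
-- def validate_grille(coords, n):
--     """Проверить, что при 4 поворотах покрываются все n*n клетки ровно один раз."""
--     used = set()
--     cur = list(coords)
--     for _ in range(4):
--         for cell in cur:
--             if cell in used:
--                 return False
--             used.add(cell)
--         cur = rotate_coords(cur, n)
--     return len(used) == n * n
-- ===== SOURCE B (Python) =====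
-- def validate_grille(coords, n):
--     """Single pass: each hole's 4-rotation orbit goes into one set; covered exactly
--     once iff the set has n*n cells and no insertion collided (4*len(coords) cells)."""
--     cells = set()
--     for (r, c) in coords:
--         cells.update([(r, c), (c, n - 1 - r), (n - 1 - r, n - 1 - c), (n - 1 - c, r)])
--     return len(cells) == n * n and len(cells) == 4 * len(coords)
-- ===== Notes on version B (the rewrite author's own statement) =====
-- stated objective: alternative
-- what changed: Replaces A's four whole-list rotation passes with an early return on collision by one pass that generates each coordinate's 4-point rotation orbit via closed formulas into a single set, then decides coverage by the two count equalities len(cells)==n*n and len(cells)==4*len(coords).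
import Mathlib
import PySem

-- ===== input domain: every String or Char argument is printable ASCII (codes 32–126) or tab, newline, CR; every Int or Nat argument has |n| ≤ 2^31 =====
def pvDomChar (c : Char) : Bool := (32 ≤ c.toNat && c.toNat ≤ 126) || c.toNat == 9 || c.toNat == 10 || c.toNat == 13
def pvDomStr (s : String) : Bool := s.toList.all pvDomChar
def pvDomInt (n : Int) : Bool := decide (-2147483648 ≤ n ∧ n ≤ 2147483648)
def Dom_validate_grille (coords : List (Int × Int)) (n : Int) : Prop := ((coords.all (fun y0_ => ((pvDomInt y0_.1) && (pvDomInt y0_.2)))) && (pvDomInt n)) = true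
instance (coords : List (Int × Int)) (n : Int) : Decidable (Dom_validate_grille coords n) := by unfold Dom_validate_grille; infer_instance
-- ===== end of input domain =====

-- B replaces A's four whole-list rotation passes (with early return on collision) by one pass
-- inserting each coordinate's 4-point rotation orbit into a single set, then checks the two counts.

-- ===== PORT A =====
def rotate_coords (coords : List (Int × Int)) (n : Int) : List (Int × Int) :=
  coords.map (fun rc => (rc.2, n - 1 - rc.1))

-- inner 'for cell in cur' loop with its early 'return False' (none = early return)
def vgPass (used : PySem.Set (Int × Int)) : List (Int × Int) → Option (PySem.Set (Int × Int))
  | [] => some used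
  | cell :: rest =>
    if PySem.Set.contains used cell then none
    else vgPass (PySem.Set.add used cell) rest

-- outer 'for _ in range(4)' loop
def vgLoop : Nat → PySem.Set (Int × Int) → List (Int × Int) → Int → Option (PySem.Set (Int × Int))
  | 0, used, _, _ => some used
  | k + 1, used, cur, n =>
    match vgPass used cur with
    | none => none
    | some u => vgLoop k u (rotate_coords cur n) n

def validate_grille (coords : List (Int × Int)) (n : Int) : Bool :=
  match vgLoop 4 PySem.Set.empty coords n with
  | none => false
  | some used => decide ((used.length : Int) = n * n)

-- ===== PORT B =====
def vgOrbit (n : Int) (rc : Int × Int) : List (Int × Int) :=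
  [(rc.1, rc.2), (rc.2, n - 1 - rc.1), (n - 1 - rc.1, n - 1 - rc.2), (n - 1 - rc.2, rc.1)]

def validate_grille_alt (coords : List (Int × Int)) (n : Int) : Bool :=
  let cells : PySem.Set (Int × Int) :=
    coords.foldl (fun s rc => PySem.Set.update s (vgOrbit n rc)) PySem.Set.empty
  decide ((cells.length : Int) = n * n) && decide ((cells.length : Int) = 4 * coords.length)

-- ===== PRECONDITION & SPEC =====
def Spec_validate_grille (coords : List (Int × Int)) (n : Int) (out : Bool) : Prop := out = validate_grille_alt coords n
instance (coords : List (Int × Int)) (n : Int) (out : Bool) : Decidable (Spec_validate_grille coords n out) := by unfold Spec_validate_grille; infer_instance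

-- ===== CLAIM (what is proved, stated in full; the proofs are below) =====
def Claim_equal_validate_grille : Prop := ∀ (coords : List (Int × Int)) (n : Int), Dom_validate_grille coords n → Spec_validate_grille coords n (validate_grille coords n)

-- ===== LEMMAS AND PROOFS =====

-- the full insertion sequence of A's four passes
def rotCat : Nat → List (Int × Int) → Int → List (Int × Int)
  | 0, _, _ => []
  | k + 1, cur, n => cur ++ rotCat k (rotate_coords cur n) n

lemma vgPass_eq (used : PySem.Set (Int × Int)) (cur : List (Int × Int)) :
    vgPass used cur =
      if cur.Nodup ∧ ∀ x ∈ cur, x ∉ used then some (used ++ cur) else none := by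
  induction cur generalizing used with
  | nil => simp [vgPass, List.nodup_nil]
  | cons a rest ih =>
    by_cases ha : a ∈ used
    · have hc : PySem.Set.contains used a = true := (PySem.Set.contains_iff used a).mpr ha
      rw [show vgPass used (a :: rest)
            = if PySem.Set.contains used a then none else vgPass (PySem.Set.add used a) rest
          from rfl, if_pos hc, if_neg]
      rintro ⟨-, hd⟩
      exact hd a (by simp) ha
    · have hc : PySem.Set.contains used a = false := by
        rcases Bool.eq_false_or_eq_true (PySem.Set.contains used a) with h | h
        · exact absurd ((PySem.Set.contains_iff used a).mp h) ha
        · exact h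
      rw [show vgPass used (a :: rest)
            = if PySem.Set.contains used a then none else vgPass (PySem.Set.add used a) rest
          from rfl, hc]
      simp only [Bool.false_eq_true, if_false]
      rw [PySem.Set.add_of_not_mem ha, ih]
      by_cases h : (a :: rest).Nodup ∧ ∀ x ∈ a :: rest, x ∉ used
      · have h1 : rest.Nodup ∧ ∀ x ∈ rest, x ∉ used ++ [a] := by
          obtain ⟨hn, hd⟩ := h
          refine ⟨(List.nodup_cons.mp hn).2, fun x hx => ?_⟩
          simp only [List.mem_append, List.mem_singleton]
          rintro (hxu | rfl)
          · exact hd x (by simp [hx]) hxu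
          · exact (List.nodup_cons.mp hn).1 hx
        rw [if_pos h1, if_pos h]
        simp
      · have h1 : ¬(rest.Nodup ∧ ∀ x ∈ rest, x ∉ used ++ [a]) := by
          intro ⟨hn, hd⟩
          apply h
          constructor
          · exact List.nodup_cons.mpr ⟨fun hmem => by simpa using hd a hmem, hn⟩
          · intro x hx
            rcases List.mem_cons.mp hx with rfl | hx'
            · exact ha
            · intro hxu; exact hd x hx' (by simp [hxu])
        rw [if_neg h1, if_neg h]

lemma vgLoop_eq (k : Nat) (used : PySem.Set (Int × Int)) (cur : List (Int × Int)) (n : Int)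
    (h : used.Nodup) :
    vgLoop k used cur n =
      if (used ++ rotCat k cur n).Nodup then some (used ++ rotCat k cur n) else none := by
  induction k generalizing used cur with
  | zero => simp [vgLoop, rotCat, h]
  | succ k ih =>
    rw [vgLoop, vgPass_eq]
    by_cases hc : cur.Nodup ∧ ∀ x ∈ cur, x ∉ used
    · rw [if_pos hc]
      have hnod : (used ++ cur).Nodup := by
        rw [List.nodup_append]
        refine ⟨h, hc.1, fun a hau b hbc heq => hc.2 b hbc (heq ▸ hau)⟩
      show vgLoop k (used ++ cur) (rotate_coords cur n) n = _
      rw [ih _ _ hnod]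
      simp only [rotCat, List.append_assoc]
    · rw [if_neg hc]
      have hbad : ¬(used ++ rotCat (k + 1) cur n).Nodup := by
        simp only [rotCat]
        intro hn
        rw [← List.append_assoc, List.nodup_append] at hn
        obtain ⟨hn1, -, -⟩ := hn
        rw [List.nodup_append] at hn1
        obtain ⟨-, hcn, hdis⟩ := hn1
        exact hc ⟨hcn, fun x hx hxu => hdis x hxu x hx rfl⟩
      rw [if_neg hbad]

lemma cells_nodup (coords : List (Int × Int)) (n : Int) (s : PySem.Set (Int × Int))
    (hs : s.Nodup) :
    (coords.foldl (fun s rc => PySem.Set.update s (vgOrbit n rc)) s).Nodup := by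
  induction coords generalizing s with
  | nil => exact hs
  | cons a rest ih =>
    simp only [List.foldl_cons]
    exact ih _ (PySem.Set.nodup_update _ _ hs)

lemma cells_mem (coords : List (Int × Int)) (n : Int) (s : PySem.Set (Int × Int))
    (x : Int × Int) :
    x ∈ coords.foldl (fun s rc => PySem.Set.update s (vgOrbit n rc)) s ↔
      x ∈ s ∨ ∃ rc ∈ coords, x ∈ vgOrbit n rc := by
  induction coords generalizing s with
  | nil => simp
  | cons a rest ih =>
    simp only [List.foldl_cons, ih, PySem.Set.mem_update, List.mem_cons]
    constructor
    · rintro ((hx | hx) | ⟨rc, hrc, hx⟩)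
      · exact Or.inl hx
      · exact Or.inr ⟨a, Or.inl rfl, hx⟩
      · exact Or.inr ⟨rc, Or.inr hrc, hx⟩
    · rintro (hx | ⟨rc, (rfl | hrc), hx⟩)
      · exact Or.inl (Or.inl hx)
      · exact Or.inl (Or.inr hx)
      · exact Or.inr ⟨rc, hrc, hx⟩

lemma rotCat_succ (k : Nat) (cur : List (Int × Int)) (n : Int) :
    rotCat (k + 1) cur n = cur ++ rotCat k (rotate_coords cur n) n := rfl

lemma rotCat4_mem (coords : List (Int × Int)) (n : Int) (x : Int × Int) :
    x ∈ rotCat 4 coords n ↔ ∃ rc ∈ coords, x ∈ vgOrbit n rc := by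
  show x ∈ rotCat (3 + 1) coords n ↔ _
  rw [rotCat_succ, rotCat_succ, rotCat_succ, rotCat_succ]
  simp only [rotCat, rotate_coords, List.map_map, List.append_nil, List.mem_append,
    List.mem_map, Function.comp, vgOrbit, List.mem_cons, List.not_mem_nil, or_false]
  have key : ∀ r : Int, n - 1 - (n - 1 - r) = r := by intro r; ring
  constructor
  · rintro (hx | ⟨a, ha, rfl⟩ | ⟨a, ha, rfl⟩ | ⟨a, ha, rfl⟩)
    · exact ⟨x, hx, Or.inl rfl⟩
    · exact ⟨a, ha, Or.inr (Or.inl rfl)⟩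
    · exact ⟨a, ha, Or.inr (Or.inr (Or.inl rfl))⟩
    · exact ⟨a, ha, Or.inr (Or.inr (Or.inr (by rw [key])))⟩
  · rintro ⟨a, ha, rfl | rfl | rfl | rfl⟩
    · exact Or.inl ha
    · exact Or.inr (Or.inl ⟨a, ha, rfl⟩)
    · exact Or.inr (Or.inr (Or.inl ⟨a, ha, rfl⟩))
    · exact Or.inr (Or.inr (Or.inr ⟨a, ha, by rw [key]⟩))

lemma rotCat4_len (coords : List (Int × Int)) (n : Int) :
    (rotCat 4 coords n).length = 4 * coords.length := by
  show (rotCat (3 + 1) coords n).length = _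
  rw [rotCat_succ, rotCat_succ, rotCat_succ, rotCat_succ]
  simp [rotCat, rotate_coords]
  omega

-- ===== VERDICT (by name: the statement is the Claim_ definition above) =====
theorem validate_grille_spec : Claim_equal_validate_grille := by
  unfold Claim_equal_validate_grille
  intro coords n _
  unfold Spec_validate_grille validate_grille validate_grille_alt
  dsimp only
  rw [vgLoop_eq 4 PySem.Set.empty coords n List.nodup_nil]
  set L := rotCat 4 coords n with hL
  set cells := coords.foldl (fun s rc => PySem.Set.update s (vgOrbit n rc)) PySem.Set.empty
    with hcells
  have hcn : cells.Nodup := cells_nodup coords n _ List.nodup_nil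
  have hcm : ∀ x, x ∈ cells ↔ x ∈ L := by
    intro x
    rw [hcells, cells_mem, hL, rotCat4_mem]
    simp
  have hlen : (L.length : Int) = 4 * coords.length := by
    rw [hL, rotCat4_len]; push_cast; ring
  by_cases hN : L.Nodup
  · rw [if_pos (by simpa using hN)]
    have hperm : cells.Perm L := (List.perm_ext_iff_of_nodup hcn hN).mpr hcm
    have hcl : cells.length = L.length := hperm.length_eq
    show decide ((((PySem.Set.empty : PySem.Set (Int × Int)) ++ L).length : Int) = n * n) = _
    simp only [PySem.Set.empty, List.nil_append, hcl, hlen]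
    simp
  · rw [if_neg (by simpa using hN)]
    have hperm : cells.Perm L.dedup :=
      (List.perm_ext_iff_of_nodup hcn L.nodup_dedup).mpr
        (fun x => by rw [hcm, List.mem_dedup])
    have hcl2 : cells.length = L.dedup.length := hperm.length_eq
    have hne : L.dedup.length ≠ L.length := by
      intro heq
      exact hN (by rw [← L.dedup_sublist.eq_of_length heq]; exact L.nodup_dedup)
    have hle := L.dedup_sublist.length_le
    have hdiff : (cells.length : Int) ≠ 4 * coords.length := by
      rw [← hlen]
      have : cells.length < L.length := by omega
      exact_mod_cast Nat.ne_of_lt this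
    show false = _
    simp [hdiff]
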